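-- pv_equiv track=rewrite | github.com/pypi-data/pypi-mirror-401 | packages/provide-foundation/provide_foundation-0.3.0.post1.tar.gz/provide_foundation-0.3.0.post1/src/provide/foundation/integrations/openobserve/formatters.py | _determine_columns
-- ===== SOURCE A (Python) =====
-- from typing import Any
--
-- def _determine_columns(hits: list[dict[str, Any]]) -> list[str]:
--     """Determine columns to display from hits."""
--     # Get all unique keys from hits
--     all_keys: set[str] = set()
--     for hit in hits:
--         all_keys.update(hit.keys())
--
--     # Sort columns, putting common ones first
--     priority_cols = ["_timestamp", "level", "service", "message"]
--     columns = []
--     for col in priority_cols: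
--         if col in all_keys:
--             columns.append(col)
--             all_keys.remove(col)
--     columns.extend(sorted(all_keys))
--     return columns
-- ===== SOURCE B (Python) =====
-- def _determine_columns(hits: "list[dict[str, object]]") -> "list[str]":
--     """Determine columns to display from hits."""
--     priority_cols = ["_timestamp", "level", "service", "message"]
--     rank = {c: i for i, c in enumerate(priority_cols)}
--     all_keys = {k for hit in hits for k in hit.keys()}
--     return sorted(all_keys, key=lambda k: (rank.get(k, len(priority_cols)), k))
-- ===== Notes on version B (the rewrite author's own statement) =====
-- stated objective: simpler
-- what changed: Replaces A's remove-from-set priority loop followed by a separate sort of the remainder with a single keyed sort of all keys under a (priority-rank, name) key.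
import Mathlib
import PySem

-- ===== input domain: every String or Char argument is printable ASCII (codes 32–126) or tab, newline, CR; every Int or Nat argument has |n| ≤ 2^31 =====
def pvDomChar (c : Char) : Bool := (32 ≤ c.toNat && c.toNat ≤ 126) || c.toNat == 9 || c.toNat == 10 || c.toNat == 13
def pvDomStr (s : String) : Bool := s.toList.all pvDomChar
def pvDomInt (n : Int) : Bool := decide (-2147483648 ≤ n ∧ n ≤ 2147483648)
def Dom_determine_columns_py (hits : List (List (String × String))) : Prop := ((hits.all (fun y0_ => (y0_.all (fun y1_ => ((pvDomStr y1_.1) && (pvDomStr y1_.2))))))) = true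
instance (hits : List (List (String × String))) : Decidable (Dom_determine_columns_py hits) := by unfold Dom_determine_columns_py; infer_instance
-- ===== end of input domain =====

-- B replaces A's remove-from-set priority loop plus separate sort of the remainder by a single
-- keyed sort of all keys under a (priority-rank, name) key (objective: simpler).

-- ===== PORT A =====
def pvPriorityCols : List String := ["_timestamp", "level", "service", "message"]

def determine_columns_py (hits : List (List (String × String))) : List String :=
  -- all_keys = set(); for hit in hits: all_keys.update(hit.keys())
  let all_keys : PySem.Set String :=
    hits.foldl (fun s hit => PySem.Set.update s (hit.map Prod.fst)) PySem.Set.empty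
  -- for col in priority_cols: if col in all_keys: columns.append(col); all_keys.remove(col)
  -- (all_keys.remove(col) is guarded by the membership test, so it never raises: exact as Set.discard)
  let st := pvPriorityCols.foldl
    (fun (st : List String × PySem.Set String) col =>
      if PySem.Set.contains st.2 col then (st.1 ++ [col], PySem.Set.discard st.2 col) else st)
    ([], all_keys)
  -- columns.extend(sorted(all_keys)); return columns
  st.1 ++ PySem.List.sorted st.2 (fun x => x) false

-- ===== PORT B =====
def pvPriorityColsB : List String := ["_timestamp", "level", "service", "message"]

-- rank = {c: i for i, c in enumerate(priority_cols)}
def pvRank : PySem.Dict String Int :=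
  (PySem.List.enumerate pvPriorityColsB).foldl (fun d p => d.insert p.2 p.1) PySem.Dict.empty

def determine_columns_py_alt (hits : List (List (String × String))) : List String :=
  -- all_keys = {k for hit in hits for k in hit.keys()}
  let all_keys : PySem.Set String := PySem.Set.ofList (hits.flatMap (fun hit => hit.map Prod.fst))
  -- sorted(all_keys, key=lambda k: (rank.get(k, len(priority_cols)), k))
  PySem.List.sorted2 all_keys (fun k => pvRank.getD k (pvPriorityColsB.length : Int)) (fun k => k) false

-- ===== PRECONDITION & SPEC =====
def Spec_determine_columns_py (hits : List (List (String × String))) (out : List String) : Prop := out = determine_columns_py_alt hits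
instance (hits : List (List (String × String))) (out : List String) : Decidable (Spec_determine_columns_py hits out) := by unfold Spec_determine_columns_py; infer_instance

-- ===== CLAIM (what is proved, stated in full; the proofs are below) =====
def Claim_equal_determine_columns_py : Prop := ∀ (hits : List (List (String × String))), Dom_determine_columns_py hits → Spec_determine_columns_py hits (determine_columns_py hits)

-- ===== LEMMAS AND PROOFS =====

-- B's (rank, name) sort key, seen as a single lexicographic key
def pvKey (k : String) : Lex (Int × String) := toLex (pvRank.getD k (pvPriorityColsB.length : Int), k)

-- both ports build the same list of distinct keys
theorem pv_same_keys (hits : List (List (String × String))) :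
    hits.foldl (fun s hit => PySem.Set.update s (hit.map Prod.fst)) PySem.Set.empty
      = PySem.Set.ofList (hits.flatMap (fun hit => hit.map Prod.fst)) := by
  have H : ∀ (hs : List (List (String × String))) (s : PySem.Set String),
      hs.foldl (fun s hit => PySem.Set.update s (hit.map Prod.fst)) s
        = PySem.Set.update s (hs.flatMap (fun hit => hit.map Prod.fst)) := by
    intro hs
    induction hs with
    | nil => intro s; simp [PySem.Set.update_nil]
    | cons h t ih =>
        intro s
        simp only [List.foldl_cons, List.flatMap_cons, PySem.Set.update_append, ih]
  rw [H]; exact PySem.Set.update_nil_left _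

-- A's priority loop, characterised: found priority columns in priority order, and the rest
theorem pv_loop (pcols : List String) (pc_nodup : pcols.Nodup) :
    ∀ (keys : PySem.Set String) (cols0 : List String),
    pcols.foldl
      (fun (st : List String × PySem.Set String) col =>
        if PySem.Set.contains st.2 col then (st.1 ++ [col], PySem.Set.discard st.2 col) else st)
      (cols0, keys)
    = (cols0 ++ pcols.filter (fun c => PySem.Set.contains keys c),
       keys.filter (fun k => !pcols.contains k)) := by
  induction pcols with
  | nil => intro keys cols0; simp [List.filter]
  | cons c t ih =>
      intro keys cols0
      have hc : c ∉ t := (List.nodup_cons.mp pc_nodup).1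
      have ht : t.Nodup := (List.nodup_cons.mp pc_nodup).2
      simp only [List.foldl_cons]
      by_cases h : PySem.Set.contains keys c
      · rw [if_pos h, ih ht]
        refine Prod.ext ?_ ?_
        · show cols0 ++ [c] ++ List.filter (fun x => (keys.discard c).contains x) t = _
          have h1 : List.filter (fun x => (keys.discard c).contains x) t
              = List.filter (fun x => keys.contains x) t := by
            apply List.filter_congr
            intro x hx
            have hxc : x ≠ c := fun e => hc (e ▸ hx)
            apply Bool.coe_iff_coe.mp
            rw [PySem.Set.contains_iff, PySem.Set.contains_iff, PySem.Set.mem_discard]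
            exact ⟨fun ⟨a, _⟩ => a, fun a => ⟨a, hxc⟩⟩
          rw [h1, List.filter_cons, if_pos h, List.append_assoc, List.singleton_append]
        · show List.filter (fun k => !t.contains k) (keys.discard c) = _
          show List.filter (fun k => !t.contains k) (List.filter (fun y => !(y == c)) keys) = _
          rw [List.filter_filter]
          apply List.filter_congr
          intro x _
          by_cases e : x = c <;> simp [e, Bool.and_comm]
      · rw [if_neg h, ih ht]
        have hck : c ∉ keys := by
          intro hm; exact h ((PySem.Set.contains_iff _ _).mpr hm)
        refine Prod.ext ?_ ?_
        · show cols0 ++ List.filter (fun x => keys.contains x) t = _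
          rw [List.filter_cons, if_neg (by simpa using h)]
        · show List.filter (fun k => !t.contains k) keys = _
          apply List.filter_congr
          intro x hx
          have : x ≠ c := fun e => hck (e ▸ hx)
          simp [this]

-- B's tuple-key insertion sort is the sort by the single lexicographic key pvKey
theorem pv_sorted2_eq (xs : List String) :
    PySem.List.sorted2 xs (fun k => pvRank.getD k (pvPriorityColsB.length : Int)) (fun k => k) false
      = PySem.List.sorted xs pvKey false := by
  show List.foldl _ [] xs = List.foldl _ [] xs
  congr 1
  funext acc x
  congr 1
  funext a b
  show (decide _ || (!decide _ && decide _)) = decide (pvKey a < pvKey b)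
  rcases lt_trichotomy (pvRank.getD a (pvPriorityColsB.length : Int)) (pvRank.getD b (pvPriorityColsB.length : Int)) with h | h | h <;>
    simp [pvKey, Prod.Lex.toLex_lt_toLex, h, not_lt_of_gt, ne_of_lt]

theorem pv_rank_expand : pvRank = ((((PySem.Dict.empty.insert "_timestamp" 0).insert "level" 1).insert "service" 2).insert "message" 3) := by
  rfl

theorem pv_rank_not_mem (x : String) (hx : x ∉ pvPriorityColsB) :
    pvRank.getD x (pvPriorityColsB.length : Int) = 4 := by
  simp only [pvPriorityColsB, List.mem_cons, not_or] at hx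
  obtain ⟨h1, h2, h3, h4, -⟩ := hx
  rw [pv_rank_expand]
  simp [PySem.Dict.getD_insert, h1, h2, h3, h4, pvPriorityColsB]

theorem pv_rank_mem (x : String) (hx : x ∈ pvPriorityCols) :
    pvRank.getD x (pvPriorityColsB.length : Int) < 4 := by
  simp only [pvPriorityCols, List.mem_cons, List.not_mem_nil, or_false] at hx
  rcases hx with h | h | h | h <;> subst h <;> decide

theorem pv_main (hits : List (List (String × String))) :
    determine_columns_py hits = determine_columns_py_alt hits := by
  simp only [determine_columns_py, determine_columns_py_alt]
  set S : PySem.Set String := PySem.Set.ofList (hits.flatMap (fun hit => hit.map Prod.fst)) with hS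
  rw [pv_same_keys, pv_loop pvPriorityCols (by decide), pv_sorted2_eq, List.nil_append]
  have hSnodup : S.Nodup := PySem.Set.nodup_ofList _
  set part1 := pvPriorityCols.filter (fun c => PySem.Set.contains S c) with hp1
  set rest := S.filter (fun k => !pvPriorityCols.contains k) with hrest
  set part2 := PySem.List.sorted rest (fun x => x) false with hp2
  have hrestnodup : rest.Nodup := hSnodup.filter _
  have hp2perm : part2.Perm rest := PySem.List.sorted_perm _ _ _
  have hp2nodup : part2.Nodup := (hp2perm.nodup_iff).mpr hrestnodup
  have hmem_p2 : ∀ x ∈ part2, x ∉ pvPriorityCols := by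
    intro x hx
    have := (List.mem_filter.mp (hp2perm.mem_iff.mp hx)).2
    simpa using this
  -- the left-hand side is a permutation of S …
  have hperm : (part1 ++ part2).Perm S := by
    have h1 : part1.Perm (S.filter (fun k => pvPriorityCols.contains k)) := by
      rw [List.perm_ext_iff_of_nodup (List.Nodup.filter _ (by decide)) (hSnodup.filter _)]
      intro a
      simp only [List.mem_filter]
      constructor
      · rintro ⟨ha, hc⟩
        exact ⟨(PySem.Set.contains_iff _ _).mp hc, by simpa using ha⟩
      · rintro ⟨ha, hc⟩
        exact ⟨by simpa using hc, (PySem.Set.contains_iff _ _).mpr ha⟩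
    exact ((h1.append hp2perm).trans (List.filter_append_perm _ _))
  -- … that is strictly increasing under B's sort key
  have hpw : (part1 ++ part2).Pairwise (fun a b => pvKey a < pvKey b) := by
    rw [List.pairwise_append]
    refine ⟨?_, ?_, ?_⟩
    · exact List.Pairwise.sublist List.filter_sublist (by decide)
    · have hle := PySem.List.sorted_pairwise rest (fun x => x)
      have hne : part2.Pairwise (fun a b => a ≠ b) := hp2nodup
      refine ((hle.and hne).imp_of_mem ?_)
      intro a b ha hb ⟨hab, hne'⟩
      have ra : pvRank.getD a (pvPriorityColsB.length : Int) = 4 :=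
        pv_rank_not_mem a (by simpa [pvPriorityColsB, pvPriorityCols] using hmem_p2 a ha)
      have rb : pvRank.getD b (pvPriorityColsB.length : Int) = 4 :=
        pv_rank_not_mem b (by simpa [pvPriorityColsB, pvPriorityCols] using hmem_p2 b hb)
      simp only [pvKey, Prod.Lex.toLex_lt_toLex, ra, rb]
      exact Or.inr ⟨trivial, lt_of_le_of_ne hab hne'⟩
    · intro a ha b hb
      have ha' : a ∈ pvPriorityCols := List.mem_of_mem_filter ha
      have ra := pv_rank_mem a ha'
      have rb : pvRank.getD b (pvPriorityColsB.length : Int) = 4 :=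
        pv_rank_not_mem b (by simpa [pvPriorityColsB, pvPriorityCols] using hmem_p2 b hb)
      simp only [pvKey, Prod.Lex.toLex_lt_toLex, rb]
      exact Or.inl (by omega)
  exact (PySem.List.sorted_eq_of_perm_of_pairwise_lt S (part1 ++ part2) pvKey hperm hpw).symm

-- ===== VERDICT (by name: the statement is the Claim_ definition above) =====
theorem determine_columns_py_spec : Claim_equal_determine_columns_py := by
  intro hits _
  exact pv_main hits
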